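-- pv_equiv track=rewrite | github.com/LuisMMMTS/Python-ProgrammingFundamentals-exercises | dictionaries/1. Academy Awards.py | academy_awards
-- ===== SOURCE A (Python) =====
-- def academy_awards(alist):
--     awards={}
--     for i,j in alist:
--         if j not in awards.keys():
--             awards[j]=1
--         else:
--             awards[j]+=1
--     return awards
-- ===== SOURCE B (Python) =====
-- def academy_awards(alist):
--     seconds = [j for i, j in alist]
--     return {j: seconds.count(j) for j in seconds}
-- ===== Notes on version B (the rewrite author's own statement) =====
-- stated objective: idiomatic
-- what changed: Replaces the incremental membership-test-and-increment accumulation with a two-step count-by-scanning strategy: extract the second components, then build the result with a dict comprehension whose value is seconds.count(j), recomputed per occurrence.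
import Mathlib
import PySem

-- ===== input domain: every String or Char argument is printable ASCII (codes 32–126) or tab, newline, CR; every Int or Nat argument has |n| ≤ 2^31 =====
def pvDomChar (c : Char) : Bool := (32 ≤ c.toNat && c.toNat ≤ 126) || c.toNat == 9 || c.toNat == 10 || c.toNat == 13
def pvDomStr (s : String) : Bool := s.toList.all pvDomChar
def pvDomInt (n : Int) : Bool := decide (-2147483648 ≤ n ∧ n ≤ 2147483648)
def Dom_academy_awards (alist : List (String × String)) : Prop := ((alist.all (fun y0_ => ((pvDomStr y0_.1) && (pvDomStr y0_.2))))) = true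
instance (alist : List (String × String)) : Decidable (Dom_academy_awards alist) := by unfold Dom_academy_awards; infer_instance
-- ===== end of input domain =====

-- B replaces A's incremental membership-test-and-increment dict accumulation with a
-- count-per-element dict comprehension over the extracted second components (idiomatic; not faster).


-- ===== PORT A =====
def academy_awards (alist : List (String × String)) : List (String × Int) :=
  let awards : PySem.Dict String Int :=
    alist.foldl (fun awards ij =>
      if awards.contains ij.2 = false then awards.insert ij.2 1
      else awards.modify ij.2 0 (· + 1)) PySem.Dict.empty
  awards.items

-- ===== PORT B =====
def academy_awards_alt (alist : List (String × String)) : List (String × Int) :=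
  let seconds := alist.map (fun ij => ij.2)
  (seconds.foldl (fun d j => d.insert j (PySem.List.count seconds j)) PySem.Dict.empty).items

-- ===== PRECONDITION & SPEC =====
def Spec_academy_awards (alist : List (String × String)) (out : List (String × Int)) : Prop := out = academy_awards_alt alist
instance (alist : List (String × String)) (out : List (String × Int)) : Decidable (Spec_academy_awards alist out) := by unfold Spec_academy_awards; infer_instance

-- ===== CLAIM (what is proved, stated in full; the proofs are below) =====
def Claim_equal_academy_awards : Prop := ∀ (alist : List (String × String)), Dom_academy_awards alist → Spec_academy_awards alist (academy_awards alist)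

-- ===== LEMMAS AND PROOFS =====

-- A's loop body is the Counter step once 'insert j 1 on a missing key' is seen as 'modify j 0 (+1)'.
theorem aw_foldl_eq_counter_foldl (alist : List (String × String)) (d : PySem.Dict String Int) :
    alist.foldl (fun awards ij =>
      if awards.contains ij.2 = false then awards.insert ij.2 1
      else awards.modify ij.2 0 (· + 1)) d
    = (alist.map (fun ij => ij.2)).foldl (fun d x => d.modify x 0 (· + 1)) d := by
  induction alist generalizing d with
  | nil => rfl
  | cons p rest ih =>
      simp only [List.foldl_cons, List.map_cons]
      by_cases h : d.contains p.2 = false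
      · rw [if_pos h, ih,
          show d.insert p.2 1 = d.modify p.2 0 (· + 1) by
            simp [PySem.Dict.modify, PySem.Dict.getD_of_not_contains, h]]
      · rw [if_neg h, ih]

-- Lookup in B's fold: every key that occurs gets its (input-wide) count; nothing else changes.
theorem getD_foldl_insert_const {v : String → Int} (xs : List String) (d : PySem.Dict String Int) (k : String) :
    (xs.foldl (fun d x => d.insert x (v x)) d).getD k 0
    = if k ∈ xs then v k else d.getD k 0 := by
  induction xs generalizing d with
  | nil => simp
  | cons x rest ih =>
      simp only [List.foldl_cons, ih, List.mem_cons]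
      by_cases hk : k ∈ rest
      · simp [hk]
      · by_cases hx : k = x
        · subst hx; simp [hk, PySem.Dict.getD_insert_self]
        · simp [hk, hx, PySem.Dict.getD_insert]

theorem academy_awards_eq (alist : List (String × String)) :
    academy_awards alist = academy_awards_alt alist := by
  unfold academy_awards academy_awards_alt
  dsimp only
  rw [aw_foldl_eq_counter_foldl]
  generalize (alist.map fun ij => ij.2) = xs
  rw [← PySem.Dict.counter_eq_foldl, PySem.Dict.items_counter]
  have hnd : ((xs.foldl (fun d j => d.insert j ((PySem.List.count xs j : Nat) : Int)) PySem.Dict.empty)).keys.Nodup :=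
    PySem.Dict.nodup_keys_foldl_insert xs _ _ PySem.Dict.nodup_keys_empty
  rw [PySem.Dict.items_eq_map_keys _ hnd 0, PySem.Dict.keys_foldl_insert,
    PySem.Dict.keys_empty, PySem.Set.update_nil_left]
  refine (List.map_congr_left ?_).symm
  intro k hk
  have hkm : k ∈ xs := (PySem.Set.mem_ofList xs k).mp hk
  rw [getD_foldl_insert_const, if_pos hkm]
  simp [PySem.List.count_eq]

-- ===== VERDICT (by name: the statement is the Claim_ definition above) =====
theorem academy_awards_spec : Claim_equal_academy_awards := by
  intro alist _
  exact academy_awards_eq alist
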